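-- pv_equiv track=rewrite | github.com/MrBrantCode/unitest_baseline | mut_generate/mist_train_taco/taco_17472/solution.py | count_palindrome_ways
-- ===== SOURCE A (Python) =====
-- def count_palindrome_ways(ingredient_list: str) -> int:
--     n = len(ingredient_list)
--     (a, b, c) = (0, n - 1, 1)
--
--     while a <= b:
--         if ingredient_list[a] == '?' == ingredient_list[b]:
--             c = c * 26 % 10000009
--         elif ingredient_list[a] != '?' and ingredient_list[b] != '?' and (ingredient_list[a] != ingredient_list[b]):
--             c = 0
--             break
--         a += 1
--         b -= 1
--
--     return c
-- ===== SOURCE B (Python) =====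
-- def count_palindrome_ways(ingredient_list: str) -> int:
--     n = len(ingredient_list)
--     pairs = list(zip(ingredient_list[:n // 2], ingredient_list[::-1]))
--     if any(x != '?' and y != '?' and x != y for (x, y) in pairs):
--         return 0
--     k = sum(1 for (x, y) in pairs if x == '?' and y == '?')
--     if n % 2 == 1 and ingredient_list[n // 2] == '?':
--         k += 1
--     return pow(26, k, 10000009)
-- ===== Notes on version B (the rewrite author's own statement) =====
-- stated objective: simpler
-- what changed: Replaces the index-juggling while loop with a running modular product and break by zipping the first half of the string with its reverse, an any() mismatch check, a count of wildcard pairs (plus a wildcard centre), and one closed-form pow(26, k, 10000009).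
import Mathlib
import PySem

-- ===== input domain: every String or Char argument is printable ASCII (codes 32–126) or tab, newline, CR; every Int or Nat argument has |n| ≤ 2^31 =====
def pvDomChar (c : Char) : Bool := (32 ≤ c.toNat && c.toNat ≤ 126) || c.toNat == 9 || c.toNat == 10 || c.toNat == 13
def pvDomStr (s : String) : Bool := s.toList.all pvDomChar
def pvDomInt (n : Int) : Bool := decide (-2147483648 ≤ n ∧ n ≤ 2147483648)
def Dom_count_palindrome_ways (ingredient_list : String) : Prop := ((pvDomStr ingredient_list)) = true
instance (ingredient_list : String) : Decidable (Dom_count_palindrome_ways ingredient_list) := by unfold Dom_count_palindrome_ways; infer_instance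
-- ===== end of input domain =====

-- B replaces A's index-juggling while loop with its running modular product by a zip of the
-- first half with the reversed string, an any-mismatch check, a count of '?' pairs and one
-- closed-form pow(26, k, 10000009); objective: simpler.

-- ===== PORT A =====
-- A's while loop; fuel = length + 1 suffices since a increases every iteration.
-- The `| _, _ => c` arm is Python's IndexError; it is never reached because 0 ≤ a ≤ b < len.
def pvLoopA (s : String) : Nat → Int → Int → Int → Int
  | 0, _, _, c => c
  | fuel+1, a, b, c =>
    if a ≤ b then
      match PySem.Str.pyGet? s a, PySem.Str.pyGet? s b with
      | some x, some y =>
        if x = '?' ∧ y = '?' then pvLoopA s fuel (a+1) (b-1) (c * 26 % 10000009)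
        else if x ≠ '?' ∧ y ≠ '?' ∧ x ≠ y then 0
        else pvLoopA s fuel (a+1) (b-1) c
      | _, _ => c
    else c

def count_palindrome_ways (ingredient_list : String) : Int :=
  let n : Int := (ingredient_list.toList.length : Int)
  pvLoopA ingredient_list (ingredient_list.toList.length + 1) 0 (n - 1) 1

-- ===== PORT B =====
-- x != '?' and y != '?' and x != y
def pvMis (p : Char × Char) : Bool := p.1 != '?' && p.2 != '?' && p.1 != p.2
-- x == '?' and y == '?'
def pvQQ (p : Char × Char) : Bool := p.1 == '?' && p.2 == '?'

-- zip(s[:n//2], s[::-1]) as take/zip/reverse on the char list (n ≥ 0, so the slices are exactly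
-- take / reverse); s[n//2] is in range whenever n is odd, so getD is exact there;
-- the genexp sum of 1s is countP; pow(26, k, M) is PySem.Int.powMod.
def count_palindrome_ways_alt (ingredient_list : String) : Int :=
  let l := ingredient_list.toList
  let n := l.length
  let pairs := (l.take (n / 2)).zip l.reverse
  if pairs.any pvMis then 0
  else
    let k := pairs.countP pvQQ
    let k := if n % 2 = 1 ∧ l.getD (n / 2) ' ' = '?' then k + 1 else k
    PySem.Int.powMod 26 k 10000009

-- ===== PRECONDITION & SPEC =====
def Spec_count_palindrome_ways (ingredient_list : String) (out : Int) : Prop := out = count_palindrome_ways_alt ingredient_list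
instance (ingredient_list : String) (out : Int) : Decidable (Spec_count_palindrome_ways ingredient_list out) := by unfold Spec_count_palindrome_ways; infer_instance

-- ===== CLAIM (what is proved, stated in full; the proofs are below) =====
def Claim_equal_count_palindrome_ways : Prop := ∀ (ingredient_list : String), Dom_count_palindrome_ways ingredient_list → Spec_count_palindrome_ways ingredient_list (count_palindrome_ways ingredient_list)

-- ===== LEMMAS AND PROOFS =====

-- B's pair list, and the centre contribution still ahead of loop position a
def pvPairs (s : String) : List (Char × Char) :=
  (s.toList.take (s.toList.length / 2)).zip s.toList.reverse

def pvFlag (s : String) (a : Nat) : Nat :=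
  if s.toList.length % 2 = 1 ∧ a ≤ s.toList.length / 2 ∧ s.toList.getD (s.toList.length / 2) ' ' = '?' then 1 else 0

lemma pvMis_iff (p : Char × Char) : pvMis p = true ↔ (p.1 ≠ '?' ∧ p.2 ≠ '?' ∧ p.1 ≠ p.2) := by
  simp [pvMis, and_assoc]

lemma pvQQ_iff (p : Char × Char) : pvQQ p = true ↔ (p.1 = '?' ∧ p.2 = '?') := by
  simp [pvQQ]

lemma pvPairs_length (s : String) : (pvPairs s).length = s.toList.length / 2 := by
  simp [pvPairs]; omega

lemma pvPairs_getElem (s : String) (i : Nat) (h : i < s.toList.length / 2) :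
    (pvPairs s)[i]'(by rw [pvPairs_length]; exact h) =
      (s.toList[i]'(by omega), s.toList[s.toList.length - 1 - i]'(by omega)) := by
  simp [pvPairs, List.getElem_zip, List.getElem_take, List.getElem_reverse]

-- one multiplication step of A absorbed into the closed-form power
lemma pvStep (c : Int) (j : Nat) :
    (c * 26 % 10000009) * 26 ^ j % 10000009 = c * 26 ^ (j + 1) % 10000009 := by
  calc (c * 26 % 10000009) * 26 ^ j % 10000009
      = ((c * 26) * 26 ^ j) % 10000009 := by
        rw [Int.mul_emod, Int.emod_emod_of_dvd _ dvd_rfl, ← Int.mul_emod]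
    _ = c * 26 ^ (j + 1) % 10000009 := by rw [pow_succ]; ring_nf

-- the loop invariant: from position a with accumulator c (0 ≤ c < M), A's loop returns
-- 0 if a mismatch pair remains, else c · 26^(remaining '?' pairs + centre flag) mod M
lemma pvLoopA_eq (s : String) (fuel a : Nat) (c : Int)
    (hf : s.toList.length + 1 ≤ fuel + a) (hc0 : 0 ≤ c) (hc1 : c < 10000009) :
    pvLoopA s fuel (a : Int) ((s.toList.length : Int) - 1 - (a : Int)) c =
      (if ((pvPairs s).drop a).any pvMis then 0
       else c * 26 ^ (((pvPairs s).drop a).countP pvQQ + pvFlag s a) % 10000009) := by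
  induction fuel generalizing a c with
  | zero =>
    have hd : (pvPairs s).drop a = [] := List.drop_eq_nil_of_le (by rw [pvPairs_length]; omega)
    have hflag : pvFlag s a = 0 := by
      unfold pvFlag; rw [if_neg]; rintro ⟨h1, h2, h3⟩; omega
    simp [pvLoopA, hd, hflag, Int.emod_eq_of_lt hc0 hc1]
  | succ fuel ih =>
    by_cases hab : ((a : Int) ≤ (s.toList.length : Int) - 1 - (a : Int))
    · have h2a : 2 * a + 1 ≤ s.toList.length := by omega
      have han : a < s.toList.length := by omega
      have hbn : s.toList.length - 1 - a < s.toList.length := by omega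
      have hb : ((s.toList.length : Int) - 1 - (a : Int)) = ((s.toList.length - 1 - a : Nat) : Int) := by
        push_cast; omega
      have e1 : PySem.Str.pyGet? s (a : Int) = some (s.toList[a]'han) := by
        rw [PySem.Str.pyGet?_natCast, List.getElem?_eq_getElem han]
      have e2 : PySem.Str.pyGet? s ((s.toList.length : Int) - 1 - (a : Int)) =
          some (s.toList[s.toList.length - 1 - a]'hbn) := by
        rw [hb, PySem.Str.pyGet?_natCast, List.getElem?_eq_getElem hbn]
      have harg1 : (a : Int) + 1 = ((a + 1 : Nat) : Int) := by push_cast; ring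
      have harg2 : (s.toList.length : Int) - 1 - (a : Int) - 1 =
          ((s.toList.length : Int) - 1 - ((a + 1 : Nat) : Int)) := by push_cast; ring
      simp only [pvLoopA, if_pos hab, e1, e2]
      by_cases ha2 : a < s.toList.length / 2
      · have hdrop : (pvPairs s).drop a =
            (s.toList[a]'han, s.toList[s.toList.length - 1 - a]'hbn) :: (pvPairs s).drop (a+1) := by
          rw [List.drop_eq_getElem_cons (by rw [pvPairs_length]; exact ha2)]
          rw [pvPairs_getElem s a ha2]
        have hfl : pvFlag s (a+1) = pvFlag s a := by
          unfold pvFlag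
          apply if_congr _ rfl rfl
          constructor <;> rintro ⟨u, v, w⟩ <;> exact ⟨u, by omega, w⟩
        by_cases hqq : s.toList[a]'han = '?' ∧ s.toList[s.toList.length - 1 - a]'hbn = '?'
        · rw [if_pos hqq, harg1, harg2]
          rw [ih (a+1) (c * 26 % 10000009) (by omega)
            (Int.emod_nonneg _ (by norm_num)) (Int.emod_lt_of_pos _ (by norm_num))]
          have hm : pvMis (s.toList[a]'han, s.toList[s.toList.length - 1 - a]'hbn) = false := by
            rw [Bool.eq_false_iff]; intro h
            exact ((pvMis_iff _).1 h).1 hqq.1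
          have hq : pvQQ (s.toList[a]'han, s.toList[s.toList.length - 1 - a]'hbn) = true :=
            (pvQQ_iff _).2 ⟨hqq.1, hqq.2⟩
          rw [hdrop]
          simp only [List.any_cons, List.countP_cons, hm, hq, hfl, Bool.false_or]
          split_ifs with h
          · rfl
          · rw [pvStep, Nat.add_right_comm]
        · by_cases hmis : s.toList[a]'han ≠ '?' ∧ s.toList[s.toList.length - 1 - a]'hbn ≠ '?' ∧
              s.toList[a]'han ≠ s.toList[s.toList.length - 1 - a]'hbn
          · rw [if_neg hqq, if_pos hmis, hdrop]
            have hm : pvMis (s.toList[a]'han, s.toList[s.toList.length - 1 - a]'hbn) = true :=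
              (pvMis_iff _).2 hmis
            rw [List.any_cons, hm, Bool.true_or, if_pos rfl]
          · rw [if_neg hqq, if_neg hmis, harg1, harg2]
            rw [ih (a+1) c (by omega) hc0 hc1]
            rw [hdrop]
            have hm : pvMis (s.toList[a]'han, s.toList[s.toList.length - 1 - a]'hbn) = false := by
              rw [Bool.eq_false_iff]; intro h; exact hmis ((pvMis_iff _).1 h)
            have hq : pvQQ (s.toList[a]'han, s.toList[s.toList.length - 1 - a]'hbn) = false := by
              rw [Bool.eq_false_iff]; intro h; exact hqq ((pvQQ_iff _).1 h)
            rw [List.any_cons, hm, Bool.false_or, List.countP_cons, hq,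
              if_neg Bool.false_ne_true, add_zero, hfl]
      · -- centre position: the string length is odd and a = n / 2 = b
        have hodd : s.toList.length % 2 = 1 := by omega
        have haeq : a = s.toList.length / 2 := by omega
        have hidx : s.toList.length - 1 - a = a := by omega
        have ey : s.toList[s.toList.length - 1 - a]'hbn = s.toList[a]'han := by congr 1
        have hdrop : (pvPairs s).drop a = [] :=
          List.drop_eq_nil_of_le (by rw [pvPairs_length]; omega)
        have hdrop1 : (pvPairs s).drop (a+1) = [] :=
          List.drop_eq_nil_of_le (by rw [pvPairs_length]; omega)
        have hflag1 : pvFlag s (a+1) = 0 := by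
          unfold pvFlag; rw [if_neg]; rintro ⟨u, v, w⟩; omega
        have hgd : s.toList.getD (s.toList.length / 2) ' ' = s.toList[a]'han := by
          rw [← haeq]; exact List.getD_eq_getElem s.toList ' ' han
        by_cases hq : s.toList[a]'han = '?'
        · rw [if_pos ⟨hq, by rw [ey]; exact hq⟩, harg1, harg2]
          rw [ih (a+1) (c * 26 % 10000009) (by omega)
            (Int.emod_nonneg _ (by norm_num)) (Int.emod_lt_of_pos _ (by norm_num))]
          have hflag : pvFlag s a = 1 := by
            unfold pvFlag; rw [if_pos ⟨hodd, by omega, by rw [hgd]; exact hq⟩]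
          rw [hdrop, hdrop1, hflag, hflag1]
          simp [Int.emod_eq_of_lt (Int.emod_nonneg _ (by norm_num : (10000009:Int) ≠ 0))
            (Int.emod_lt_of_pos _ (by norm_num))]
        · have hmisf : ¬(s.toList[a]'han ≠ '?' ∧ s.toList[s.toList.length - 1 - a]'hbn ≠ '?' ∧
              s.toList[a]'han ≠ s.toList[s.toList.length - 1 - a]'hbn) := by
            rintro ⟨_, _, hne⟩; rw [ey] at hne; exact hne rfl
          rw [if_neg (by rintro ⟨h1, _⟩; exact hq h1), if_neg hmisf, harg1, harg2]
          rw [ih (a+1) c (by omega) hc0 hc1]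
          have hflag : pvFlag s a = 0 := by
            unfold pvFlag; rw [if_neg]; rintro ⟨u, v, w⟩; rw [hgd] at w; exact hq w
          rw [hdrop, hdrop1, hflag, hflag1]
    · have hd : (pvPairs s).drop a = [] := List.drop_eq_nil_of_le (by rw [pvPairs_length]; omega)
      have hflag : pvFlag s a = 0 := by
        unfold pvFlag; rw [if_neg]; rintro ⟨h1, h2, h3⟩; omega
      rw [hd, hflag]
      simp only [pvLoopA]
      rw [if_neg hab]
      simp [Int.emod_eq_of_lt hc0 hc1]

lemma pv_main (s : String) : count_palindrome_ways s = count_palindrome_ways_alt s := by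
  have h := pvLoopA_eq s (s.toList.length + 1) 0 1 (by omega) (by norm_num) (by norm_num)
  simp only [Nat.cast_zero, sub_zero, List.drop_zero] at h
  unfold count_palindrome_ways
  dsimp only
  rw [h]
  unfold count_palindrome_ways_alt
  dsimp only
  rw [PySem.Int.powMod_eq_emod _ _ (by norm_num)]
  simp only [pvPairs, one_mul]
  by_cases hany : ((s.toList.take (s.toList.length / 2)).zip s.toList.reverse).any pvMis = true
  · rw [if_pos hany, if_pos hany]
  · rw [if_neg hany, if_neg hany]
    congr 2
    unfold pvFlag
    by_cases hc : s.toList.length % 2 = 1 ∧ s.toList.getD (s.toList.length / 2) ' ' = '?'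
    · rw [if_pos ⟨hc.1, Nat.zero_le _, hc.2⟩, if_pos hc]
    · rw [if_neg (by rintro ⟨u, _, w⟩; exact hc ⟨u, w⟩), if_neg hc, add_zero]

-- ===== VERDICT (by name: the statement is the Claim_ definition above) =====
theorem count_palindrome_ways_spec : Claim_equal_count_palindrome_ways := by
  intro s _
  exact pv_main s
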